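-- pv_equiv track=rewrite | github.com/shiburaj/nptel-python-course-codes | Week7Prg2/main.py | course_ends
-- ===== SOURCE A (Python) =====
-- def course_ends(courses):
--   courses = tuple([x for x in courses if x])
--   flc = []
--   if len(courses) <= 0:
--     pass
--   elif len(courses) == 1:
--     flc.append(courses[0])
--     flc.append(courses[0])
--   else:
--     flc.append(courses[0])
--     flc.append(courses[-1])
--
--   return tuple(flc)
-- ===== SOURCE B (Python) =====
-- def course_ends(courses):
--     first = next((x for x in courses if x), None)
--     if first is None:
--         return ()
--     last = next(x for x in reversed(courses) if x)
--     return (first, last)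
-- ===== Notes on version B (the rewrite author's own statement) =====
-- stated objective: simpler
-- what changed: B never builds the filtered tuple: it finds the first truthy element with a forward scan and the last truthy element with a backward scan, returning () when none exists.
import Mathlib
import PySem

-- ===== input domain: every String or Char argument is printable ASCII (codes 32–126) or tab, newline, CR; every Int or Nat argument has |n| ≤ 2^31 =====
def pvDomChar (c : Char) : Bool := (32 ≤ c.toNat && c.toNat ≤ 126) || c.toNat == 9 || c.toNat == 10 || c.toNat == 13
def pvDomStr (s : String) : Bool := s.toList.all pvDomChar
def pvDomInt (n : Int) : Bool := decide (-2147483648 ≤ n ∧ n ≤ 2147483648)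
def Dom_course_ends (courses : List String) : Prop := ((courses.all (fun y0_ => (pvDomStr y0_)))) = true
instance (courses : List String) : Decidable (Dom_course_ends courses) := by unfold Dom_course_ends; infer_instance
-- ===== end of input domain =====

-- B differs from A by decomposition: it never builds the filtered tuple — one forward
-- scan finds the first truthy course, one backward scan the last; () when none exists.

-- ===== PORT A =====
-- courses = tuple([x for x in courses if x]); then 0/1/many-case append into flc.
-- The indexings courses[0] / courses[-1] are always in range in their branches, so
-- '.getD ""' on pyGet? is exact.
def course_ends (courses : List String) : List String :=
  let cs := courses.filter (fun x => x != "")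
  let flc : List String :=
    if cs.length ≤ 0 then []
    else if cs.length == 1 then
      [] ++ [(PySem.List.pyGet? cs 0).getD ""] ++ [(PySem.List.pyGet? cs 0).getD ""]
    else
      [] ++ [(PySem.List.pyGet? cs 0).getD ""] ++ [(PySem.List.pyGet? cs (-1)).getD ""]
  flc

-- ===== PORT B =====
-- next((x for x in courses if x), None) → find?; next(x for x in reversed(courses) if x) → reverse.find?
def course_ends_alt (courses : List String) : List String :=
  match courses.find? (fun x => x != "") with
  | none => []
  | some first =>
    match courses.reverse.find? (fun x => x != "") with
    | none => []   -- unreachable: a truthy element exists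
    | some last => [first, last]

-- ===== PRECONDITION & SPEC =====
def Spec_course_ends (courses : List String) (out : List String) : Prop := out = course_ends_alt courses
instance (courses : List String) (out : List String) : Decidable (Spec_course_ends courses out) := by unfold Spec_course_ends; infer_instance

-- ===== CLAIM (what is proved, stated in full; the proofs are below) =====
def Claim_equal_course_ends : Prop := ∀ (courses : List String), Dom_course_ends courses → Spec_course_ends courses (course_ends courses)

-- ===== LEMMAS AND PROOFS =====

-- ===== VERDICT (by name: the statement is the Claim_ definition above) =====
-- find-from-the-back equals the last element of the filtered list
theorem find?_reverse_eq_getLast?_filter (p : String → Bool) (l : List String) :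
    l.reverse.find? p = (l.filter p).getLast? := by
  rw [← List.head?_filter, List.filter_reverse, List.head?_reverse]

theorem course_ends_spec : Claim_equal_course_ends := by
  intro courses _
  unfold Spec_course_ends course_ends course_ends_alt
  rw [← List.head?_filter, find?_reverse_eq_getLast?_filter]
  cases hcs : courses.filter (fun x => x != "") with
  | nil => simp
  | cons a t =>
    cases t with
    | nil => simp
    | cons b u =>
      rcases h : (b :: u).getLast? with _ | l
      · simp [List.getLast?_eq_none_iff] at h
      · simp [PySem.List.pyGet?_neg_one, h]
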